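-- pv_equiv track=rewrite | github.com/Ajirohack/CORE | archived_archivist_components/cognitive/cognitive_system.py | _group_patterns
-- ===== SOURCE A (Python) =====
-- from typing import Any, Dict, List, Optional
--
-- def _group_patterns(patterns: List[str]) -> Dict[str, List[str]]:
--     """Group patterns by their types"""
--     groups = {}
--
--     for pattern in patterns:
--         if not pattern.startswith("pattern:"):
--             continue
--
--         parts = pattern.split(":", 2)
--         if len(parts) < 2:
--             continue
--
--         group_name = parts[1]
--         if group_name not in groups:
--             groups[group_name] = []
--
--         groups[group_name].append(pattern)
--
--     return groups
-- ===== SOURCE B (Python) =====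
-- def _group_patterns(patterns):
--     """Group patterns by their types (two-phase: collect keys, then gather each group)."""
--     valid = [p for p in patterns if p.startswith("pattern:")]
--     keys = list(dict.fromkeys(p.split(":", 2)[1] for p in valid))
--     return {k: [p for p in valid if p.split(":", 2)[1] == k] for k in keys}
-- ===== Notes on version B (the rewrite author's own statement) =====
-- stated objective: simpler
-- what changed: Replaces the incremental dict-bucketing loop (setdefault-style insert + append per element) with a two-phase comprehension: filter the valid patterns once, dedup their keys in first-occurrence order, then build each group by a per-key scan.
import Mathlib
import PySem

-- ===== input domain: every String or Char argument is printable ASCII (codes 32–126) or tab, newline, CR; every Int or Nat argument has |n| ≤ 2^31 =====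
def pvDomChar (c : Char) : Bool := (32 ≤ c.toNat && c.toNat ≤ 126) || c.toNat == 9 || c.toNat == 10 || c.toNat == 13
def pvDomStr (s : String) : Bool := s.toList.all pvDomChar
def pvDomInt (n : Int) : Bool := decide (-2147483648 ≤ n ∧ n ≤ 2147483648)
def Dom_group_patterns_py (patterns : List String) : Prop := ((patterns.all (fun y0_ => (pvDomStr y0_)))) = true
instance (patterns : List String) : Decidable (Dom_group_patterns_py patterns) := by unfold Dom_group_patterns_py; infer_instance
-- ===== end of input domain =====

-- B is a two-phase regrouping (filter, dedup keys, gather per key) instead of A's incremental dict bucketing; equal return value everywhere.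

-- ===== PORT A =====
def group_patterns_py (patterns : List String) : List (String × List String) :=
  (patterns.foldl (fun groups pattern =>
    if ¬ (PySem.Str.startswith pattern "pattern:") then groups
    else
      -- parts = pattern.split(":", 2); sep ":" is nonempty so splitMax? is always some
      let parts := (PySem.Str.splitMax? pattern ":" 2).getD []
      if parts.length < 2 then groups
      else
        -- parts[1]: exact, index 1 is in range here (length ≥ 2)
        let group_name := PySem.List.pyGetD parts 1 ""
        let groups' := if groups.contains group_name then groups else groups.insert group_name ([] : List String)
        groups'.modify group_name [] (fun l => l ++ [pattern])
    ) (PySem.Dict.empty : PySem.Dict String (List String))).items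

-- ===== PORT B =====
-- p.split(":", 2)[1]: exact, index 1 in range wherever B uses it (p starts with "pattern:")
def pvKeyOf (p : String) : String :=
  PySem.List.pyGetD ((PySem.Str.splitMax? p ":" 2).getD []) 1 ""

def group_patterns_py_alt (patterns : List String) : List (String × List String) :=
  let valid := patterns.filter (fun p => PySem.Str.startswith p "pattern:")
  let keys := PySem.List.dedup (valid.map pvKeyOf)
  keys.map (fun k => (k, valid.filter (fun p => pvKeyOf p == k)))

-- ===== PRECONDITION & SPEC =====
def Spec_group_patterns_py (patterns : List String) (out : List (String × List String)) : Prop := out = group_patterns_py_alt patterns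
instance (patterns : List String) (out : List (String × List String)) : Decidable (Spec_group_patterns_py patterns out) := by unfold Spec_group_patterns_py; infer_instance

-- ===== CLAIM (what is proved, stated in full; the proofs are below) =====
def Claim_equal_group_patterns_py : Prop := ∀ (patterns : List String), Dom_group_patterns_py patterns → Spec_group_patterns_py patterns (group_patterns_py patterns)

-- ===== LEMMAS AND PROOFS =====

-- proof-only name for A's loop body (definitionally the lambda inside group_patterns_py)
def pvStepA (groups : PySem.Dict String (List String)) (pattern : String) : PySem.Dict String (List String) :=
  if ¬ (PySem.Str.startswith pattern "pattern:") then groups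
  else
    let parts := (PySem.Str.splitMax? pattern ":" 2).getD []
    if parts.length < 2 then groups
    else
      let group_name := PySem.List.pyGetD parts 1 ""
      let groups' := if groups.contains group_name then groups else groups.insert group_name ([] : List String)
      groups'.modify group_name [] (fun l => l ++ [pattern])

-- splitOnMax.go always yields at least acc.length + 1 pieces
theorem pv_go_len_ge (sep : List Char) (fuel : Nat) : ∀ (m : Nat) (l cur : List Char) (acc : List (List Char)),
    acc.length + 1 ≤ (PySem.Chars.splitOnMax.go sep fuel m l cur acc).length := by
  induction fuel with
  | zero => intro m l cur acc; simp [PySem.Chars.splitOnMax.go]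
  | succ fuel ih =>
    intro m l cur acc
    cases l with
    | nil => simp [PySem.Chars.splitOnMax.go]
    | cons c rest =>
      by_cases hm : m = 0
      · simp [PySem.Chars.splitOnMax.go, hm]
      · by_cases hp : sep.isPrefixOf (c :: rest) = true
        · simpa [PySem.Chars.splitOnMax.go, hm, hp] using
            Nat.le_of_succ_le (by simpa using ih (m - 1) (List.drop sep.length (c :: rest)) [] (cur.reverse :: acc))
        · simpa [PySem.Chars.splitOnMax.go, hm, hp] using ih m rest (c :: cur) acc

-- if the (nonempty) separator occurs in l and a split is still allowed, go yields at least acc.length + 2 pieces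
theorem pv_go_len_two (sep : List Char) (hsep : sep ≠ []) (fuel : Nat) :
    ∀ (m : Nat) (l cur : List Char) (acc : List (List Char)), l.length < fuel → 1 ≤ m → sep <:+: l →
    acc.length + 2 ≤ (PySem.Chars.splitOnMax.go sep fuel m l cur acc).length := by
  induction fuel with
  | zero => intro m l cur acc h _ _; omega
  | succ fuel ih =>
    intro m l cur acc hlen hm hinf
    cases l with
    | nil => exact absurd (List.eq_nil_of_infix_nil hinf) hsep
    | cons c rest =>
      have hm0 : ¬ m = 0 := by omega
      by_cases hp : sep.isPrefixOf (c :: rest) = true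
      · simpa [PySem.Chars.splitOnMax.go, hm0, hp] using
          pv_go_len_ge sep fuel (m - 1) (List.drop sep.length (c :: rest)) [] (cur.reverse :: acc)
      · have hinf' : sep <:+: rest := by
          obtain ⟨u, v, huv⟩ := hinf
          cases u with
          | nil => exact absurd (List.isPrefixOf_iff_prefix.mpr ⟨v, by simpa using huv⟩) hp
          | cons a u' =>
            have : u' ++ sep ++ v = rest := by
              have := huv
              simp only [List.cons_append, List.cons.injEq] at this
              exact this.2
            exact ⟨u', v, this⟩
        have hlen' : rest.length < fuel := by
          simp only [List.length_cons] at hlen; omega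
        simpa [PySem.Chars.splitOnMax.go, hm0, hp] using ih m rest (c :: cur) acc hlen' hm hinf'

-- a valid pattern splits into at least two parts
theorem pv_parts_len (p : String) (h : PySem.Str.startswith p "pattern:" = true) :
    2 ≤ ((PySem.Str.splitMax? p ":" 2).getD []).length := by
  have hpre : ("pattern:".toList) <+: p.toList := by
    simpa using (PySem.Chars.startswith_iff p.toList "pattern:".toList).mp (by simpa using h)
  have hinf : [':'] <:+: p.toList := by
    obtain ⟨t, ht⟩ := hpre
    exact ⟨"pattern".toList, t, by simpa using ht⟩
  have := pv_go_len_two [':'] (by simp) (p.toList.length + 1) 2 p.toList [] []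
    (by omega) (by omega) hinf
  simpa [PySem.Str.splitMax?, PySem.Chars.splitMax?, PySem.Chars.splitOnMax] using this

-- "if k not in d: d[k] = []" followed by a modify at k is just a modify at k
theorem pv_setdefault_modify (d : PySem.Dict String (List String)) (k : String) (f : List String → List String) :
    ((if d.contains k then d else d.insert k ([] : List String)).modify k [] f) = d.modify k [] f := by
  by_cases h : d.contains k = true
  · simp [h]
  · have hc : d.contains k = false := by simpa using h
    simp [h, PySem.Dict.modify, PySem.Dict.getD_insert_self, PySem.Dict.insert_insert_self,
      PySem.Dict.getD_of_not_contains d ([] : List String) hc]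

-- A's loop body on a valid pattern is a single modify at its key
theorem pv_stepA_pos (d : PySem.Dict String (List String)) (p : String)
    (h : PySem.Str.startswith p "pattern:" = true) :
    pvStepA d p = d.modify (pvKeyOf p) [] (fun l => l ++ [p]) := by
  have h2 := pv_parts_len p h
  unfold pvStepA
  simp only [h, not_true_eq_false, if_false]
  rw [if_neg (by omega)]
  exact pv_setdefault_modify d (pvKeyOf p) _

theorem pv_stepA_neg (d : PySem.Dict String (List String)) (p : String)
    (h : ¬ PySem.Str.startswith p "pattern:" = true) :
    pvStepA d p = d := by
  unfold pvStepA
  have h' : PySem.Str.startswith p "pattern:" = false := by simpa using h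
  rw [h']
  simp

-- A's whole fold is the modify-fold over the filtered list
theorem pv_fold_filter (l : List String) : ∀ (d : PySem.Dict String (List String)),
    l.foldl pvStepA d
    = (l.filter (fun p => PySem.Str.startswith p "pattern:")).foldl
        (fun d p => d.modify (pvKeyOf p) [] (fun l => l ++ [p])) d := by
  induction l with
  | nil => intro d; rfl
  | cons p rest ih =>
    intro d
    by_cases h : PySem.Str.startswith p "pattern:" = true
    · simp only [List.foldl_cons, List.filter_cons, h, if_true, pv_stepA_pos d p h]
      exact ih _
    · have h' : PySem.Str.startswith p "pattern:" = false := by simpa using h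
      simp only [List.foldl_cons, List.filter_cons, h', Bool.false_eq_true, if_false, pv_stepA_neg d p h]
      exact ih d

theorem group_patterns_py_eq_alt (patterns : List String) :
    group_patterns_py patterns = group_patterns_py_alt patterns := by
  rw [show group_patterns_py patterns = (patterns.foldl pvStepA PySem.Dict.empty).items from rfl]
  unfold group_patterns_py_alt
  rw [pv_fold_filter]
  set valid := patterns.filter (fun p => PySem.Str.startswith p "pattern:") with hvalid
  have hmap : valid.foldl (fun d p => d.modify (pvKeyOf p) [] (fun l => l ++ [p])) PySem.Dict.empty
      = (valid.map (fun p => (pvKeyOf p, p))).foldl (fun d q => d.modify q.1 [] (fun l => l ++ [q.2])) PySem.Dict.empty := by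
    rw [List.foldl_map]
  rw [hmap]
  set L := valid.map (fun p => (pvKeyOf p, p)) with hL
  set dA := L.foldl (fun d q => d.modify q.1 [] (fun l => l ++ [q.2])) PySem.Dict.empty with hdA
  have hnd : dA.keys.Nodup := by
    rw [hdA]
    exact PySem.Dict.nodup_keys_foldl_modify_key L Prod.fst [] (fun d q => (fun l => l ++ [q.2])) PySem.Dict.empty (by simp)
  have hkeys : dA.keys = PySem.List.dedup (valid.map pvKeyOf) := by
    rw [hdA, PySem.Dict.keys_foldl_modify_key]
    simp [hL, List.map_map, PySem.Set.update_nil_left, Function.comp_def]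
  rw [PySem.Dict.items_eq_map_keys dA hnd ([] : List String), hkeys]
  apply List.map_congr_left
  intro k hk
  congr 1
  rw [hdA, PySem.Dict.getD_foldl_modify_append]
  simp only [PySem.Dict.getD_empty, List.nil_append, hL, List.filter_map, List.map_map]
  simp [Function.comp_def]

-- ===== VERDICT (by name: the statement is the Claim_ definition above) =====
theorem group_patterns_py_spec : Claim_equal_group_patterns_py := by
  intro patterns _
  unfold Spec_group_patterns_py
  exact group_patterns_py_eq_alt patterns
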